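-- pv_equiv track=rewrite | github.com/Lyne-7/DDOS-Detection | features_calculation.py | calculate_dst_host_srv_count
-- ===== SOURCE A (Python) =====
-- def calculate_dst_host_srv_count(packet_data):
--     """
--     Calculate the number of destination hosts with the same service.
--     """
--     dst_host_services = {}
--     for packet in packet_data:
--         dst_host = packet['dst_host']
--         service = packet['service']
--         if dst_host not in dst_host_services:
--             dst_host_services[dst_host] = set()
--         dst_host_services[dst_host].add(service)
--
--     # Return the number of distinct destination-host-service pairs
--     return sum(len(services) for services in dst_host_services.values())
-- ===== SOURCE B (Python) =====
-- def calculate_dst_host_srv_count(packet_data):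
--     """
--     Calculate the number of destination hosts with the same service.
--     """
--     pairs = sorted((p['dst_host'], p['service']) for p in packet_data)
--     count = 0
--     prev = None
--     for pr in pairs:
--         if pr != prev:
--             count += 1
--         prev = pr
--     return count
-- ===== Notes on version B (the rewrite author's own statement) =====
-- stated objective: alternative
-- what changed: Replaces the dict-of-sets grouping (per-host membership branch, per-host service set, final sum over groups) with sort-then-scan: collect the (dst_host, service) pairs, sort them so equal pairs become adjacent, and count block boundaries in one linear scan with a prev accumulator.
import Mathlib
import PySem

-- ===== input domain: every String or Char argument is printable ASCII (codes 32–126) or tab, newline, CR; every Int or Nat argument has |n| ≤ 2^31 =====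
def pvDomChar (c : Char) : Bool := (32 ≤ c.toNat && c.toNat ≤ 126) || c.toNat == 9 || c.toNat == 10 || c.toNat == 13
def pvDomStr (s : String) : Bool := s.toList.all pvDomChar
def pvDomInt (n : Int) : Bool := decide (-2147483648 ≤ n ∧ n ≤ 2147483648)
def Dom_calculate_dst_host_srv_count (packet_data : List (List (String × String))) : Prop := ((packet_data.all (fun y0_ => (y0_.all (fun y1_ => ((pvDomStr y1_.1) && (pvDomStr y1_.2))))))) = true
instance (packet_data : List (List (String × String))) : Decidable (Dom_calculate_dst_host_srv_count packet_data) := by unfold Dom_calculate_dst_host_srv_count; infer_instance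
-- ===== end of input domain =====

-- B replaces A's dict-of-sets grouping + sum over groups by sort-then-scan: sort the (host, service)
-- pairs and count block boundaries in one linear pass (alternative algorithm; return value only).

-- ===== PORT A =====
-- the loop: builds dict host -> set of services; none = a packet missing one of the keys (Python KeyError)
def pvLoopA : List (List (String × String)) → PySem.Dict String (PySem.Set String) →
    Option (PySem.Dict String (PySem.Set String))
  | [], d => some d
  | packet :: rest, d =>
    match (PySem.Dict.mk packet).get? "dst_host", (PySem.Dict.mk packet).get? "service" with
    | some dst, some srv =>
        let d1 := if d.contains dst then d else d.insert dst PySem.Set.empty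
        pvLoopA rest (d1.modify dst PySem.Set.empty (fun s => PySem.Set.add s srv))
    | _, _ => none

def calculate_dst_host_srv_count (packet_data : List (List (String × String))) : Int :=
  match pvLoopA packet_data PySem.Dict.empty with
  | some d => ((d.values).map PySem.Set.len).sum
  | none => 0    -- unreachable under Pre_ (Python raises KeyError there)

-- ===== PORT B =====
-- the generator: the list of (dst_host, service) pairs; none = a packet missing one of the keys (KeyError)
def pvPairs? : List (List (String × String)) → Option (List (String × String))
  | [] => some []
  | packet :: rest =>
    match (PySem.Dict.mk packet).get? "dst_host", (PySem.Dict.mk packet).get? "service" with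
    | some dst, some srv => (pvPairs? rest).map (fun ps => (dst, srv) :: ps)
    | _, _ => none

-- the scan: 'for pr in pairs: if pr != prev: count += 1; prev = pr'
def pvScanB : List (String × String) → Option (String × String) → Int → Int
  | [], _, count => count
  | pr :: rest, prev, count =>
    pvScanB rest (some pr) (if some pr ≠ prev then count + 1 else count)

def calculate_dst_host_srv_count_alt (packet_data : List (List (String × String))) : Int :=
  match pvPairs? packet_data with
  | some pairs => pvScanB (PySem.List.sorted2 pairs Prod.fst Prod.snd) none 0
  | none => 0    -- unreachable under Pre_ (Python raises KeyError there)

-- ===== PRECONDITION & SPEC =====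
-- Pre_ excludes exactly the packets missing the 'dst_host' or 'service' key, on which Python A raises KeyError.
def Pre_calculate_dst_host_srv_count (packet_data : List (List (String × String))) : Prop :=
  ∀ p ∈ packet_data, "dst_host" ∈ p.map Prod.fst ∧ "service" ∈ p.map Prod.fst

instance (packet_data : List (List (String × String))) : Decidable (Pre_calculate_dst_host_srv_count packet_data) := by
  unfold Pre_calculate_dst_host_srv_count; infer_instance

def pvWitness_calculate_dst_host_srv_count : (List (List (String × String))) :=
  ([[("dst_host", "h1"), ("service", "http")], [("dst_host", "h1"), ("service", "ftp")]])

def Spec_calculate_dst_host_srv_count (packet_data : List (List (String × String))) (out : Int) : Prop := out = calculate_dst_host_srv_count_alt packet_data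
instance (packet_data : List (List (String × String))) (out : Int) : Decidable (Spec_calculate_dst_host_srv_count packet_data out) := by unfold Spec_calculate_dst_host_srv_count; infer_instance

-- ===== CLAIM (what is proved, stated in full; the proofs are below) =====
def Claim_equal_calculate_dst_host_srv_count : Prop := ∀ (packet_data : List (List (String × String))), Dom_calculate_dst_host_srv_count packet_data → Pre_calculate_dst_host_srv_count packet_data → Spec_calculate_dst_host_srv_count packet_data (calculate_dst_host_srv_count packet_data)

-- ===== LEMMAS AND PROOFS =====

-- ghost loop (proof device only): the flat set of pairs seen so far
def pvLoopB : List (List (String × String)) → PySem.Set (String × String) →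
    Option (PySem.Set (String × String))
  | [], s => some s
  | packet :: rest, s =>
    match (PySem.Dict.mk packet).get? "dst_host", (PySem.Dict.mk packet).get? "service" with
    | some dst, some srv => pvLoopB rest (PySem.Set.add s (dst, srv))
    | _, _ => none

-- the quantity A finally sums, read off the dict's items
def pvTotal (d : PySem.Dict String (PySem.Set String)) : Int :=
  (d.items.map (fun p => ((p.2.length : Nat) : Int))).sum

lemma pvSum_map_overwrite (l : List (String × PySem.Set String)) (k : String)
    (v : PySem.Set String) (hk : (l.map Prod.fst).Nodup)
    (st : PySem.Set String) (hfind : l.find? (fun p => p.1 == k) = some (k, st)) :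
    ((l.map (fun p => if p.1 = k then (k, v) else p)).map (fun p => ((p.2.length : Nat) : Int))).sum
      = (l.map (fun p => ((p.2.length : Nat) : Int))).sum - (st.length : Int) + (v.length : Int) := by
  induction l with
  | nil => simp at hfind
  | cons p rest ih =>
    simp only [List.map_cons, List.nodup_cons] at hk
    by_cases hpk : p.1 = k
    · have hfind' : List.find? (fun p => p.1 == k) (p :: rest) = some p := by
        simp [hpk]
      rw [hfind'] at hfind
      injection hfind with hp
      subst hp
      have hrest : rest.map (fun p => if p.1 = k then (k, v) else p) = rest := by
        conv_rhs => rw [← List.map_id rest]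
        apply List.map_congr_left
        intro q hq
        have hq1 : q.1 ≠ k := by
          intro h
          apply hk.1
          have := List.mem_map_of_mem (f := Prod.fst) hq
          simpa [h] using this
        simp [hq1]
      rw [List.map_cons, if_pos hpk, List.map_cons, List.sum_cons, hrest, List.map_cons, List.sum_cons]
      ring
    · have hfind' : List.find? (fun p => p.1 == k) (p :: rest) = List.find? (fun p => p.1 == k) rest := by
        simp [hpk]
      rw [hfind'] at hfind
      simp only [List.map_cons, if_neg hpk, List.sum_cons]
      rw [ih hk.2 hfind]
      ring

-- effect of one dict insert on the summed group sizes
lemma pvTotal_insert (d : PySem.Dict String (PySem.Set String)) (k : String)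
    (v : PySem.Set String) (hnd : d.keys.Nodup) :
    pvTotal (d.insert k v)
      = pvTotal d - ((d.get? k).elim 0 (fun st => ((st.length : Nat) : Int))) + (v.length : Int) := by
  by_cases hc : d.contains k = true
  · have hsome : (d.get? k).isSome := by
      rw [← PySem.Dict.contains_eq_isSome_get?]; exact hc
    obtain ⟨st, hst⟩ := Option.isSome_iff_exists.mp hsome
    have hfind : d.items.find? (fun p => p.1 == k) = some (k, st) := by
      unfold PySem.Dict.get? at hst
      obtain ⟨q, hq, hq2⟩ := Option.map_eq_some_iff.mp hst
      have hq1 : q.1 = k := by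
        have := List.find?_some hq
        simpa using this
      have : q = (k, st) := by
        cases q; simp_all
      rwa [this] at hq
    have hkeys : (d.items.map Prod.fst).Nodup := hnd
    unfold pvTotal
    rw [PySem.Dict.items_insert_of_contains d v hc]
    have hconv : d.items.map (fun p : String × PySem.Set String => if (p.1 == k) = true then (k, v) else p)
        = d.items.map (fun p => if p.1 = k then (k, v) else p) := by
      apply List.map_congr_left; intro q _; simp
    rw [hconv, pvSum_map_overwrite d.items k v hkeys st hfind, hst]
    simp
  · have hnone : d.get? k = none := by
      rw [PySem.Dict.get?_eq_none_iff_contains]; simpa using hc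
    unfold pvTotal
    rw [PySem.Dict.items_insert_of_not_contains d v (by simpa using hc), hnone]
    simp

-- one set-add changes the flat set's size by 0 or 1
lemma pvLen_add (s : PySem.Set (String × String)) (y : String × String) :
    ((PySem.Set.add s y).length : Int) = (s.length : Int) + (if y ∈ s then 0 else 1) := by
  rw [PySem.Set.add_eq_ite]
  split_ifs <;> simp

-- A's loop stays in lock-step with the ghost set loop: summed group sizes = flat-set size
lemma pvLoop_inv (l : List (List (String × String)))
    (d : PySem.Dict String (PySem.Set String)) (s : PySem.Set (String × String))
    (hnd : d.keys.Nodup)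
    (hmem : ∀ h x, (h, x) ∈ s ↔ ∃ st, d.get? h = some st ∧ x ∈ st)
    (hlen : pvTotal d = (s.length : Int)) :
    (pvLoopA l d).map pvTotal = (pvLoopB l s).map (fun t => ((t.length : Nat) : Int)) := by
  induction l generalizing d s with
  | nil => simpa [pvLoopA, pvLoopB]
  | cons packet rest ih =>
    simp only [pvLoopA, pvLoopB]
    cases hdst : (PySem.Dict.mk packet).get? "dst_host" with
    | none => simp
    | some dst =>
      cases hsrv : (PySem.Dict.mk packet).get? "service" with
      | none => simp
      | some srv =>
        simp only
        -- the combined update is one overwrite insert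
        set st0 := d.getD dst PySem.Set.empty with hst0
        have hstep : (if d.contains dst then d else d.insert dst PySem.Set.empty).modify dst
            PySem.Set.empty (fun s => PySem.Set.add s srv)
            = d.insert dst (PySem.Set.add st0 srv) := by
          unfold PySem.Dict.modify
          by_cases hc : d.contains dst = true
          · rw [if_pos hc]
          · rw [if_neg hc]
            rw [PySem.Dict.insert_insert_self]
            have hgd : d.getD dst PySem.Set.empty = PySem.Set.empty :=
              PySem.Dict.getD_of_not_contains d _ (by simpa using hc)
            rw [PySem.Dict.getD_insert_self, hst0, hgd]
        rw [hstep]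
        apply ih
        · exact PySem.Dict.nodup_keys_insert d dst _ hnd
        · intro h x
          rw [PySem.Set.mem_add]
          rw [PySem.Dict.get?_insert]
          by_cases hh : h = dst
          · subst hh
            simp only [if_true]
            constructor
            · rintro (hin | hpair)
              · obtain ⟨st, hget, hx⟩ := (hmem h x).mp hin
                refine ⟨_, rfl, ?_⟩
                rw [PySem.Set.mem_add]
                left
                have : st0 = st := by
                  rw [hst0, PySem.Dict.getD_eq_get?_getD, hget]; rfl
                rwa [this]
              · injection hpair with h1 h2
                subst h2
                refine ⟨_, rfl, ?_⟩
                rw [PySem.Set.mem_add]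
                right; rfl
            · rintro ⟨st, hget, hx⟩
              obtain rfl : PySem.Set.add st0 srv = st := by injection hget
              rw [PySem.Set.mem_add] at hx
              rcases hx with hx | rfl
              · left
                apply (hmem h x).mpr
                cases hget' : d.get? h with
                | none =>
                  exfalso
                  have : st0 = PySem.Set.empty := by
                    rw [hst0, PySem.Dict.getD_eq_get?_getD, hget']; rfl
                  rw [this] at hx; simp [PySem.Set.empty] at hx
                | some st' =>
                  have : st0 = st' := by
                    rw [hst0, PySem.Dict.getD_eq_get?_getD, hget']; rfl
                  exact ⟨st', rfl, this ▸ hx⟩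
              · right; rfl
          · simp only [if_neg hh]
            rw [hmem h x]
            constructor
            · rintro (h1 | h2)
              · exact h1
              · exact absurd (congrArg Prod.fst h2) hh
            · exact Or.inl
        · rw [pvTotal_insert d dst _ hnd, hlen, pvLen_add]
          have hpairmem : (dst, srv) ∈ s ↔ srv ∈ st0 := by
            rw [hmem dst srv]
            cases hget' : d.get? dst with
            | none =>
              have : st0 = PySem.Set.empty := by
                rw [hst0, PySem.Dict.getD_eq_get?_getD, hget']; rfl
              simp [this, PySem.Set.empty]
            | some st' =>
              have : st0 = st' := by
                rw [hst0, PySem.Dict.getD_eq_get?_getD, hget']; rfl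
              simp [this]
          rw [PySem.Set.add_eq_ite]
          cases hget' : d.get? dst with
          | none =>
            have h0 : st0 = PySem.Set.empty := by
              rw [hst0, PySem.Dict.getD_eq_get?_getD, hget']; rfl
            have : ¬ (dst, srv) ∈ s := by
              rw [hpairmem, h0]; simp [PySem.Set.empty]
            simp [this, h0, PySem.Set.empty]
          | some st' =>
            have h0 : st0 = st' := by
              rw [hst0, PySem.Dict.getD_eq_get?_getD, hget']; rfl
            subst h0
            by_cases hx : srv ∈ st0
            · have : (dst, srv) ∈ s := hpairmem.mpr hx
              simp [hx, this]
            · have : ¬ (dst, srv) ∈ s := fun hm => hx (hpairmem.mp hm)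
              simp [hx, this]
              ring

-- linking the ghost loop to B's pair list
lemma pvLoopB_of_pairs_none (l : List (List (String × String))) (s : PySem.Set (String × String))
    (h : pvPairs? l = none) : pvLoopB l s = none := by
  induction l generalizing s with
  | nil => simp [pvPairs?] at h
  | cons packet rest ih =>
    simp only [pvPairs?] at h
    simp only [pvLoopB]
    cases hdst : (PySem.Dict.mk packet).get? "dst_host" with
    | none => rfl
    | some dst =>
      cases hsrv : (PySem.Dict.mk packet).get? "service" with
      | none => rfl
      | some srv =>
        rw [hdst, hsrv] at h
        simp only at h ⊢
        exact ih _ (by cases hp : pvPairs? rest <;> simp [hp] at h ⊢)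

lemma pvLoopB_of_pairs_some (l : List (List (String × String))) (ps : List (String × String))
    (h : pvPairs? l = some ps) :
    ∀ s : PySem.Set (String × String), pvLoopB l s = some (List.foldl PySem.Set.add s ps) := by
  induction l generalizing ps with
  | nil =>
    simp only [pvPairs?, Option.some.injEq] at h
    subst h; intro s; simp [pvLoopB]
  | cons packet rest ih =>
    intro s
    simp only [pvPairs?] at h
    simp only [pvLoopB]
    cases hdst : (PySem.Dict.mk packet).get? "dst_host" with
    | none => rw [hdst] at h; simp at h
    | some dst =>
      cases hsrv : (PySem.Dict.mk packet).get? "service" with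
      | none => rw [hdst, hsrv] at h; simp at h
      | some srv =>
        rw [hdst, hsrv] at h
        simp only at h ⊢
        cases hp : pvPairs? rest with
        | none => rw [hp] at h; simp at h
        | some ps' =>
          rw [hp] at h
          simp only [Option.map_some, Option.some.injEq] at h
          subst h
          simp only [List.foldl_cons]
          exact ih ps' hp (PySem.Set.add s (dst, srv))

-- the lexicographic order Python's tuple sort uses
def pvLexLe (a b : String × String) : Prop := a.1 < b.1 ∨ (a.1 = b.1 ∧ a.2 ≤ b.2)

-- the boolean comparison inside PySem.List.sorted2 with keys fst, snd
def pvLt (a b : String × String) : Bool :=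
  decide (a.1 < b.1) || (!decide (b.1 < a.1) && decide (a.2 < b.2))

lemma pvLexLe_of_pvLt {a b : String × String} (h : pvLt a b = true) : pvLexLe a b := by
  unfold pvLt at h
  simp only [Bool.or_eq_true, Bool.and_eq_true, Bool.not_eq_true', decide_eq_true_eq,
    decide_eq_false_iff_not] at h
  rcases h with h | ⟨h1, h2⟩
  · exact Or.inl h
  · rcases lt_or_eq_of_le (not_lt.mp h1) with hlt | heq
    · exact Or.inl hlt
    · exact Or.inr ⟨heq, le_of_lt h2⟩

lemma pvLexLe_of_not_pvLt {a b : String × String} (h : pvLt a b = false) : pvLexLe b a := by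
  unfold pvLt at h
  simp only [Bool.or_eq_false_iff, Bool.and_eq_false_iff, Bool.not_eq_false', decide_eq_true_eq,
    decide_eq_false_iff_not] at h
  obtain ⟨h1, h2⟩ := h
  rcases h2 with h2 | h2
  · exact Or.inl h2
  · rcases lt_or_eq_of_le (not_lt.mp h1) with hlt | heq
    · exact Or.inl hlt
    · exact Or.inr ⟨heq, not_lt.mp h2⟩

lemma pvLexLe_trans {a b c : String × String} (h1 : pvLexLe a b) (h2 : pvLexLe b c) : pvLexLe a c := by
  rcases h1 with h1 | ⟨h1, h1'⟩ <;> rcases h2 with h2 | ⟨h2, h2'⟩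
  · exact Or.inl (lt_trans h1 h2)
  · exact Or.inl (h2 ▸ h1)
  · exact Or.inl (h1 ▸ h2)
  · exact Or.inr ⟨h1.trans h2, h1'.trans h2'⟩

lemma pvLexLe_antisymm {a b : String × String} (h1 : pvLexLe a b) (h2 : pvLexLe b a) : a = b := by
  rcases h1 with h1 | ⟨h1, h1'⟩ <;> rcases h2 with h2 | ⟨h2, h2'⟩
  · exact absurd h2 (lt_asymm h1)
  · exact absurd h1 (h2 ▸ lt_irrefl _)
  · exact absurd h2 (h1 ▸ lt_irrefl _)
  · exact Prod.ext h1 (le_antisymm h1' h2')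

lemma pvInsertBy_pairwise (x : String × String) (ys : List (String × String))
    (h : ys.Pairwise pvLexLe) : (PySem.List.insertBy pvLt x ys).Pairwise pvLexLe := by
  induction ys with
  | nil => simp [PySem.List.insertBy]
  | cons y ys ih =>
    rw [List.pairwise_cons] at h
    by_cases hb : pvLt x y = true
    · rw [show PySem.List.insertBy pvLt x (y :: ys) = x :: y :: ys from by
        simp [PySem.List.insertBy, hb]]
      rw [List.pairwise_cons]
      refine ⟨?_, List.pairwise_cons.mpr h⟩
      intro z hz
      rcases List.mem_cons.mp hz with rfl | hz'
      · exact pvLexLe_of_pvLt hb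
      · exact pvLexLe_trans (pvLexLe_of_pvLt hb) (h.1 z hz')
    · rw [show PySem.List.insertBy pvLt x (y :: ys) = y :: PySem.List.insertBy pvLt x ys from by
        simp [PySem.List.insertBy, hb]]
      rw [List.pairwise_cons]
      refine ⟨?_, ih h.2⟩
      intro z hz
      rcases (PySem.List.insertBy_mem_iff pvLt x z ys).mp hz with rfl | hz'
      · exact pvLexLe_of_not_pvLt (Bool.eq_false_iff.mpr hb)
      · exact h.1 z hz'

lemma pvSorted2_pairwise (ps : List (String × String)) :
    (PySem.List.sorted2 ps Prod.fst Prod.snd).Pairwise pvLexLe := by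
  show (List.foldl (fun acc x => PySem.List.insertBy pvLt x acc) [] ps).Pairwise pvLexLe
  have : ∀ (l : List (String × String)) (acc : List (String × String)),
      acc.Pairwise pvLexLe →
      (List.foldl (fun acc x => PySem.List.insertBy pvLt x acc) acc l).Pairwise pvLexLe := by
    intro l
    induction l with
    | nil => intro acc h; simpa
    | cons x l ih =>
      intro acc h
      exact ih _ (pvInsertBy_pairwise x acc h)
  exact this ps [] List.Pairwise.nil

-- the boundary scan on a sorted list, prev already seen and minimal
lemma pvScanB_some (l : List (String × String)) (hp : l.Pairwise pvLexLe)
    (p : String × String) (hmin : ∀ x ∈ l, pvLexLe p x) (c : Int) :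
    pvScanB l (some p) c = c + ((l.toFinset.erase p).card : Int) := by
  induction l generalizing p c with
  | nil => simp [pvScanB]
  | cons h t ih =>
    rw [List.pairwise_cons] at hp
    by_cases hph : p = h
    · subst hph
      have : pvScanB (p :: t) (some p) c = pvScanB t (some p) c := by
        simp [pvScanB]
      rw [this, ih hp.2 p hp.1 c]
      congr 2
      rw [List.toFinset_cons, Finset.erase_insert_eq_erase]
    · have : pvScanB (h :: t) (some p) c = pvScanB t (some h) (c + 1) := by
        simp [pvScanB, Ne.symm hph]
      rw [this, ih hp.2 h hp.1 (c + 1)]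
      have hpnotin : p ∉ (h :: t).toFinset := by
        simp only [List.toFinset_cons, Finset.mem_insert, List.mem_toFinset]
        rintro (rfl | hpt)
        · exact hph rfl
        · exact hph (pvLexLe_antisymm (hmin h (List.mem_cons_self)) (hp.1 p hpt))
      rw [Finset.erase_eq_self.mpr hpnotin, List.toFinset_cons]
      have hmemins : h ∈ insert h t.toFinset := Finset.mem_insert_self h _
      have hcard : ((insert h t.toFinset).erase h).card + 1 = (insert h t.toFinset).card :=
        Finset.card_erase_add_one hmemins
      rw [Finset.erase_insert_eq_erase] at hcard
      omega

lemma pvScanB_none (l : List (String × String)) (hp : l.Pairwise pvLexLe) (c : Int) :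
    pvScanB l none c = c + (l.toFinset.card : Int) := by
  cases l with
  | nil => simp [pvScanB]
  | cons h t =>
    rw [List.pairwise_cons] at hp
    have : pvScanB (h :: t) none c = pvScanB t (some h) (c + 1) := by
      simp [pvScanB]
    rw [this, pvScanB_some t hp.2 h hp.1 (c + 1), List.toFinset_cons]
    have hcard : ((insert h t.toFinset).erase h).card + 1 = (insert h t.toFinset).card :=
      Finset.card_erase_add_one (Finset.mem_insert_self h _)
    rw [Finset.erase_insert_eq_erase] at hcard
    omega

-- the number of distinct pairs, both ways
lemma pvOfList_length_eq_card (ps : List (String × String)) :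
    ((PySem.Set.ofList ps).length : Int) = (ps.toFinset.card : Int) := by
  have hnd : (PySem.Set.ofList ps).Nodup := PySem.Set.nodup_ofList ps
  have hfs : (PySem.Set.ofList ps).toFinset = ps.toFinset := by
    apply Finset.ext
    intro x
    simp [PySem.Set.mem_ofList]
  rw [← List.toFinset_card_of_nodup hnd, hfs]

-- ===== VERDICT (by name: the statement is the Claim_ definition above) =====
theorem calculate_dst_host_srv_count_spec : Claim_equal_calculate_dst_host_srv_count := by
  intro packet_data _ _
  unfold Spec_calculate_dst_host_srv_count
  unfold calculate_dst_host_srv_count calculate_dst_host_srv_count_alt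
  have hinv := pvLoop_inv packet_data PySem.Dict.empty PySem.Set.empty
    (by simp [PySem.Dict.empty, PySem.Dict.keys])
    (by intro h x; simp [PySem.Set.empty, PySem.Dict.get?_empty])
    (by simp [pvTotal, PySem.Dict.empty])
  cases hps : pvPairs? packet_data with
  | none =>
    rw [pvLoopB_of_pairs_none packet_data PySem.Set.empty hps] at hinv
    cases hA : pvLoopA packet_data PySem.Dict.empty with
    | none => rfl
    | some d => rw [hA] at hinv; simp at hinv
  | some ps =>
    rw [pvLoopB_of_pairs_some packet_data ps hps PySem.Set.empty] at hinv
    cases hA : pvLoopA packet_data PySem.Dict.empty with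
    | none => rw [hA] at hinv; simp at hinv
    | some d =>
      rw [hA] at hinv
      simp only [Option.map_some, Option.some.injEq] at hinv
      -- A's side: the summed group sizes are pvTotal d
      have hAval : ((d.values).map PySem.Set.len).sum = pvTotal d := by
        unfold pvTotal PySem.Dict.values
        rw [List.map_map]
        rfl
      -- B's side: the boundary scan of the sorted pairs counts the distinct pairs
      have hperm : (PySem.List.sorted2 ps Prod.fst Prod.snd).toFinset = ps.toFinset :=
        List.toFinset_eq_of_perm _ _ (PySem.List.sorted2_perm ps Prod.fst Prod.snd false)
      have hfold : List.foldl PySem.Set.add PySem.Set.empty ps = PySem.Set.ofList ps :=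
        (PySem.Set.ofList_eq_foldl ps).symm
      show ((d.values).map PySem.Set.len).sum
          = pvScanB (PySem.List.sorted2 ps Prod.fst Prod.snd) none 0
      rw [hAval, hinv, hfold, pvOfList_length_eq_card,
        pvScanB_none _ (pvSorted2_pairwise ps) 0, hperm]
      ring
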